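-- pv_equiv track=rewrite | github.com/shreyatpandey/Coding-Challenges | Amazon/OA-Sample/Min-Remove-To-Satisfy-Threshold/Source.py | min_elements_to_remove
-- ===== SOURCE A (Python) =====
-- def min_elements_to_remove(arr, k, threshold):
--     """
--     Finds the minimum number of elements to be removed such that the sum of any k elements in the remaining array does not exceed the threshold.
--
--     Args:
--         arr: An unsorted array of positive integers with duplicates.
--         k: An integer representing the number of elements to consider for the sum.
--         threshold: An integer representing the maximum allowed sum of k elements.
--
--     Returns:
--         The minimum number of elements to be removed.
--     """
--     n = len(arr)
--
--     # If the array has less than k elements, we cannot pick k elements,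
--     # so the condition is vacuously true.
--     if n < k:
--         return 0
--
--     sorted_arr = sorted(arr)
--
--     # Calculate the sum of the smallest k elements
--     current_sum = sum(sorted_arr[:k])
--
--     # If the sum of the smallest k elements already exceeds the threshold,
--     # we must remove elements until fewer than k remain.
--     if current_sum > threshold:
--         return n - k + 1
--
--     max_kept = k  # We can at least keep the smallest k elements
--
--     # Use a sliding window to find the largest number of elements we can keep
--     # such that the sum of the largest k among them is within the threshold.
--     # The window [l, r] represents the k largest elements if we keep elements up to index r.
--     l = 0
--     for r in range(k, n):
--         current_sum = current_sum - sorted_arr[l] + sorted_arr[r]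
--         l += 1
--         # The current window is from index l to r, representing the k largest elements
--         # if we keep elements up to index r. The number of elements kept is r + 1.
--         if current_sum <= threshold:
--             max_kept = r + 1
--
--     return n - max_kept
-- ===== SOURCE B (Python) =====
-- def min_elements_to_remove(arr, k, threshold):
--     n = len(arr)
--     if n < k:
--         return 0
--     s = sorted(arr)
--     prefix = [0]
--     for x in s:
--         prefix.append(prefix[-1] + x)
--     if prefix[k] > threshold:
--         return n - k + 1
--     lo, hi = k - 1, n - 1
--     while lo < hi:
--         mid = (lo + hi + 1) // 2
--         if prefix[mid + 1] - prefix[mid + 1 - k] <= threshold: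
--             lo = mid
--         else:
--             hi = mid - 1
--     return n - (lo + 1)
-- ===== Notes on version B (the rewrite author's own statement) =====
-- stated objective: alternative
-- what changed: Replaces A's incremental sliding-window scan over all windows with a prefix-sum table plus a binary search for the largest feasible window end (valid because window sums over a sorted array are monotone).
-- outside the precondition, e.g. on min_elements_to_remove([], -6, -2): A returns 7, B raises IndexError
import Mathlib
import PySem

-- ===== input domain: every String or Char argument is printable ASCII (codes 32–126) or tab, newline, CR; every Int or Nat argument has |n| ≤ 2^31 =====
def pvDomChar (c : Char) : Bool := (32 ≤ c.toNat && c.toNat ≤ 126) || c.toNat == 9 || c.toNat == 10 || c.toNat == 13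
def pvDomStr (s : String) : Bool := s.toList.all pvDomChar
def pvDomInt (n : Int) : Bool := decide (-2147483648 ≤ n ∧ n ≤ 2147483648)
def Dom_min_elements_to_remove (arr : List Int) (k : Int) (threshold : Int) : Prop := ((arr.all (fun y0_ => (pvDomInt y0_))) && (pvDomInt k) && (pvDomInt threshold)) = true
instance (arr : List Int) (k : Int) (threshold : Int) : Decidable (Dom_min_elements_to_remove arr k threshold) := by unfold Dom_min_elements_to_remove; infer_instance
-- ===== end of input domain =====

-- B replaces A's linear sliding-window scan by a prefix-sum table and a binary search
-- over window ends (an alternative algorithm of similar cost; equal return values on Pre_).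

-- ===== PORT A =====
-- Literal port of A.  pyGetD is exact here: under Pre_ (0 ≤ k) every index the loop
-- touches is in range, so Python never raises inside Pre_.
def min_elements_to_remove (arr : List Int) (k : Int) (threshold : Int) : Int :=
  let n : Int := arr.length
  if n < k then 0
  else
    let sorted_arr := PySem.List.sorted arr (fun x => x) false
    let current_sum := (PySem.List.slice sorted_arr none (some k)).sum
    if current_sum > threshold then n - k + 1
    else
      let st := (PySem.List.pyRange k n 1).foldl
        (fun (st : Int × Int × Int) r =>
          let cur := st.1 - PySem.List.pyGetD sorted_arr st.2.1 0 + PySem.List.pyGetD sorted_arr r 0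
          (cur, st.2.1 + 1, if cur ≤ threshold then r + 1 else st.2.2))
        (current_sum, 0, k)
      n - st.2.2

-- ===== PORT B =====
-- prefix = [0]; for x in s: prefix.append(prefix[-1] + x)   (running sums, front to back)
def pvPrefix (acc : Int) : List Int → List Int
  | [] => [acc]
  | x :: xs => acc :: pvPrefix (acc + x) xs

-- while lo < hi: mid = (lo+hi+1)//2; if prefix[mid+1]-prefix[mid+1-k] <= threshold: lo = mid else hi = mid-1
def pvBsearch (pfx : List Int) (k threshold : Int) (lo hi : Int) : Int :=
  if h : lo < hi then
    let mid := PySem.Int.floordiv (lo + hi + 1) 2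
    if PySem.List.pyGetD pfx (mid + 1) 0 - PySem.List.pyGetD pfx (mid + 1 - k) 0 ≤ threshold
    then pvBsearch pfx k threshold mid hi
    else pvBsearch pfx k threshold lo (mid - 1)
  else lo
termination_by (hi - lo).toNat
decreasing_by
  all_goals
    have h2 := PySem.Int.floordiv_two_mid_bounds (lo := lo + 1) (hi := hi) (by omega)
    have h3 : lo + 1 + hi = lo + hi + 1 := by ring
    rw [h3] at h2
    omega

def min_elements_to_remove_alt (arr : List Int) (k : Int) (threshold : Int) : Int :=
  let n : Int := arr.length
  if n < k then 0
  else
    let s := PySem.List.sorted arr (fun x => x) false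
    let pfx := pvPrefix 0 s   -- `prefix` in Source B; renamed (Lean keyword)
    if PySem.List.pyGetD pfx k 0 > threshold then n - k + 1
    else n - (pvBsearch pfx k threshold (k - 1) (n - 1) + 1)

-- ===== PRECONDITION & SPEC =====
-- Pre_ excludes negative k (a nonsensical count for this task), where Python's
-- negative-index wraparound drives both programs: A raises IndexError on most such
-- inputs and B raises on some where A still returns (see the cited example).
def Pre_min_elements_to_remove (arr : List Int) (k : Int) (threshold : Int) : Prop := 0 ≤ k
instance (arr : List Int) (k : Int) (threshold : Int) : Decidable (Pre_min_elements_to_remove arr k threshold) := by unfold Pre_min_elements_to_remove; infer_instance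

def pvWitness_min_elements_to_remove : List Int × Int × Int := ([3, 1, 2, 4], 2, 5)

def Spec_min_elements_to_remove (arr : List Int) (k : Int) (threshold : Int) (out : Int) : Prop := out = min_elements_to_remove_alt arr k threshold
instance (arr : List Int) (k : Int) (threshold : Int) (out : Int) : Decidable (Spec_min_elements_to_remove arr k threshold out) := by unfold Spec_min_elements_to_remove; infer_instance

-- ===== CLAIM (what is proved, stated in full; the proofs are below) =====
def Claim_equal_min_elements_to_remove : Prop := ∀ (arr : List Int) (k : Int) (threshold : Int), Dom_min_elements_to_remove arr k threshold → Pre_min_elements_to_remove arr k threshold → Spec_min_elements_to_remove arr k threshold (min_elements_to_remove arr k threshold)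

-- ===== LEMMAS AND PROOFS =====

-- window sum: sum of the k largest among the first m kept elements of the sorted list
def pvW (s : List Int) (kn m : Nat) : Int := (s.take m).sum - (s.take (m - kn)).sum

abbrev pvP (s : List Int) (kn : Nat) (T : Int) (m : Nat) : Prop := kn ≤ m ∧ pvW s kn m ≤ T

theorem pvW_succ (s : List Int) (kn j : Nat) (hkj : kn ≤ j) (hj : j < s.length) :
    pvW s kn (j + 1) = pvW s kn j - s[j - kn]'(by omega) + s[j] := by
  have h1 : j + 1 - kn = (j - kn) + 1 := by omega
  unfold pvW
  rw [h1, List.take_succ, List.take_succ, List.sum_append, List.sum_append,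
    List.getElem?_eq_getElem hj, List.getElem?_eq_getElem (by omega : j - kn < s.length)]
  simp
  ring

theorem pvW_mono (arr : List Int) (kn m m' : Nat) (h1 : kn ≤ m) (h2 : m ≤ m')
    (h3 : m' ≤ (PySem.List.sorted arr (fun x => x) false).length) :
    pvW (PySem.List.sorted arr (fun x => x) false) kn m ≤
      pvW (PySem.List.sorted arr (fun x => x) false) kn m' := by
  induction m', h2 using Nat.le_induction with
  | base => exact le_refl _
  | succ m' hm ih =>
    have h4 : m' < (PySem.List.sorted arr (fun x => x) false).length := by omega
    have h5 := ih (by omega)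
    rw [pvW_succ _ _ _ (by omega) h4]
    have h6 := PySem.List.sorted_id_getElem_mono (xs := arr)
      (p := m' - kn) (q := m') (by omega) h4
    omega

theorem pvPrefix_getD (s : List Int) (acc : Int) (i : Nat) (hi : i ≤ s.length) :
    PySem.List.pyGetD (pvPrefix acc s) ((i : Nat) : Int) 0 = acc + (s.take i).sum := by
  rw [PySem.List.pyGetD_natCast]
  induction s generalizing acc i with
  | nil =>
    have h0 : i = 0 := by simpa using hi
    subst h0; simp [pvPrefix]
  | cons x xs ih =>
    cases i with
    | zero => simp [pvPrefix]
    | succ i =>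
      have h := ih (acc + x) i (by simpa using hi)
      simp only [pvPrefix, List.getD_cons_succ, h, List.take_succ_cons, List.sum_cons]
      ring

theorem pvLoopA (s : List Int) (k T : Int) (kn n j : Nat) (hk : k = (kn : Int))
    (hn : n = s.length) (hkj : kn ≤ j) (hjn : j ≤ n) :
    (((PySem.List.pyRange (j : Int) (n : Int) 1).foldl
      (fun (st : Int × Int × Int) r =>
        let cur := st.1 - PySem.List.pyGetD s st.2.1 0 + PySem.List.pyGetD s r 0
        (cur, st.2.1 + 1, if cur ≤ T then r + 1 else st.2.2))
      (pvW s kn j, (j : Int) - k, (Nat.findGreatest (pvP s kn T) j : Int))).2.2)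
    = (Nat.findGreatest (pvP s kn T) n : Int) := by
  obtain ⟨d, hdj⟩ : ∃ d, n - j = d := ⟨_, rfl⟩
  induction d generalizing j with
  | zero =>
    have hjn' : j = n := by omega
    subst hjn'
    simp
  | succ d ih =>
    have hjn2 : j < n := by omega
    rw [PySem.List.pyRange_one_cons (by exact_mod_cast hjn2), List.foldl_cons]
    have e1 : (j : Int) - k = ((j - kn : Nat) : Int) := by
      rw [hk]; push_cast [hkj]; ring
    have e2 : PySem.List.pyGetD s ((j : Int) - k) 0 = s[j - kn]'(by omega) := by
      rw [e1, PySem.List.pyGetD_natCast, List.getD_eq_getElem _ _ (by omega)]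
    have e3 : PySem.List.pyGetD s ((j : Int)) 0 = s[j]'(by omega) := by
      rw [PySem.List.pyGetD_natCast, List.getD_eq_getElem _ _ (by omega)]
    simp only [e2, e3]
    have hA : pvW s kn j - s[j - kn]'(by omega) + s[j]'(by omega) = pvW s kn (j + 1) :=
      (pvW_succ s kn j hkj (by omega)).symm
    rw [hA]
    have hB : (j : Int) - k + 1 = ((j + 1 : Nat) : Int) - k := by push_cast; ring
    have hC : (if pvW s kn (j + 1) ≤ T then (j : Int) + 1
        else (Nat.findGreatest (pvP s kn T) j : Int))
        = (Nat.findGreatest (pvP s kn T) (j + 1) : Int) := by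
      rw [Nat.findGreatest_succ]
      by_cases hW : pvW s kn (j + 1) ≤ T
      · rw [if_pos hW, if_pos ⟨by omega, hW⟩]; push_cast; ring
      · rw [if_neg hW, if_neg (by simp [pvP, hW])]
    rw [hB, hC]
    have := ih (j + 1) (by omega) (by omega) (by omega)
    push_cast at this ⊢
    exact this

theorem pvSearchB (arr : List Int) (k T : Int) (kn n : Nat) (hk : k = (kn : Int))
    (hn : n = (PySem.List.sorted arr (fun x => x) false).length)
    (a b : Nat) (hka : kn ≤ a) (hab : a ≤ b) (hbn : b ≤ n)
    (hPa : pvW (PySem.List.sorted arr (fun x => x) false) kn a ≤ T)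
    (hmax : ∀ m, kn ≤ m → m ≤ n → pvW (PySem.List.sorted arr (fun x => x) false) kn m ≤ T → m ≤ b) :
    pvBsearch (pvPrefix 0 (PySem.List.sorted arr (fun x => x) false)) k T ((a : Int) - 1) ((b : Int) - 1)
    = (Nat.findGreatest (pvP (PySem.List.sorted arr (fun x => x) false) kn T) n : Int) - 1 := by
  set s := PySem.List.sorted arr (fun x => x) false with hs
  obtain ⟨d, hd⟩ : ∃ d, b - a ≤ d := ⟨b - a, le_rfl⟩
  induction d generalizing a b with
  | zero =>
    have hab' : a = b := by omega
    subst hab'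
    rw [pvBsearch, dif_neg (by omega)]
    have hg1 : a ≤ Nat.findGreatest (pvP s kn T) n :=
      Nat.le_findGreatest hbn (⟨hka, hPa⟩ : pvP s kn T a)
    have hPg := Nat.findGreatest_spec (P := pvP s kn T) (m := a) hbn ⟨hka, hPa⟩
    have hg2 : Nat.findGreatest (pvP s kn T) n ≤ a :=
      hmax _ hPg.1 (Nat.findGreatest_le n) hPg.2
    omega
  | succ d ih =>
    by_cases hab' : a = b
    · subst hab'
      rw [pvBsearch, dif_neg (by omega)]
      have hg1 : a ≤ Nat.findGreatest (pvP s kn T) n :=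
        Nat.le_findGreatest hbn (⟨hka, hPa⟩ : pvP s kn T a)
      have hPg := Nat.findGreatest_spec (P := pvP s kn T) (m := a) hbn ⟨hka, hPa⟩
      have hg2 : Nat.findGreatest (pvP s kn T) n ≤ a :=
        hmax _ hPg.1 (Nat.findGreatest_le n) hPg.2
      omega
    · have haltb : a < b := by omega
      have hlt : ((a : Int) - 1) < (b : Int) - 1 := by omega
      have hmb := PySem.Int.floordiv_two_mid_bounds (lo := (a : Int)) (hi := (b : Int) - 1)
        (by omega)
      have hmid0 : 0 ≤ PySem.Int.floordiv ((a : Int) + ((b : Int) - 1)) 2 := by omega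
      set c : Nat := (PySem.Int.floordiv ((a : Int) + ((b : Int) - 1)) 2).toNat + 1 with hc
      have hcb : a + 1 ≤ c ∧ c ≤ b := by constructor <;> omega
      have hmid : PySem.Int.floordiv ((a : Int) - 1 + ((b : Int) - 1) + 1) 2 = (c : Int) - 1 := by
        have : (a : Int) - 1 + ((b : Int) - 1) + 1 = (a : Int) + ((b : Int) - 1) := by ring
        rw [this]; omega
      rw [pvBsearch, dif_pos hlt]
      simp only [hmid]
      rw [show ((c : Int) - 1 + 1) = ((c : Nat) : Int) from by ring]
      have hck : (c : Int) - k = ((c - kn : Nat) : Int) := by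
        rw [hk]; push_cast [show kn ≤ c by omega]; ring
      rw [hck, pvPrefix_getD s 0 c (by omega), pvPrefix_getD s 0 (c - kn) (by omega)]
      have hWc : 0 + (s.take c).sum - (0 + (s.take (c - kn)).sum) = pvW s kn c := by
        unfold pvW; ring
      rw [hWc]
      split_ifs with hW
      · exact ih c b (by omega) (by omega) hbn hW hmax (by omega)
      · have hmax' : ∀ m, kn ≤ m → m ≤ n → pvW s kn m ≤ T → m ≤ c - 1 := by
          intro m h1 h2 h3
          by_contra hcm
          have hmono := pvW_mono arr kn c m (by omega) (by omega) (by rw [← hs]; omega)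
          rw [← hs] at hmono
          exact hW (le_trans hmono h3)
        rw [show ((c : Int) - 1 - 1) = ((c - 1 : Nat) : Int) - 1 from by omega]
        exact ih a (c - 1) hka (by omega) (by omega) hPa hmax' (by omega)

-- ===== VERDICT (by name: the statement is the Claim_ definition above) =====
theorem min_elements_to_remove_spec : Claim_equal_min_elements_to_remove := by
  intro arr k threshold _ hpre
  unfold Pre_min_elements_to_remove at hpre
  unfold Spec_min_elements_to_remove
  simp only [min_elements_to_remove, min_elements_to_remove_alt]
  set s := PySem.List.sorted arr (fun x => x) false with hs
  set kn := k.toNat with hknd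
  have hkk : k = (kn : Int) := by omega
  by_cases h1 : (arr.length : Int) < k
  · simp only [if_pos h1]
  · simp only [if_neg h1]
    have hlen : s.length = arr.length := by rw [hs]; simp [PySem.List.length_sorted]
    have hknn : kn ≤ s.length := by omega
    have hslice : (PySem.List.slice s none (some k)).sum = pvW s kn kn := by
      rw [hkk, PySem.List.slice_to_natCast]
      unfold pvW; simp
    have hpfx : PySem.List.pyGetD (pvPrefix 0 s) k 0 = pvW s kn kn := by
      rw [hkk, pvPrefix_getD s 0 kn hknn]
      unfold pvW; simp
    rw [hslice, hpfx]
    by_cases h2 : pvW s kn kn > threshold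
    · simp only [if_pos h2]
    · simp only [if_neg h2]
      have hGkn : Nat.findGreatest (pvP s kn threshold) kn = kn :=
        le_antisymm (Nat.findGreatest_le kn)
          (Nat.le_findGreatest le_rfl (⟨le_rfl, by omega⟩ : pvP s kn threshold kn))
      have hA := pvLoopA s k threshold kn s.length kn hkk rfl le_rfl hknn
      rw [show ((kn : Int) - k) = 0 from by omega, hGkn] at hA
      have hB := pvSearchB arr k threshold kn s.length hkk (by rw [hs]) kn s.length
        le_rfl hknn le_rfl (by rw [← hs]; omega) (fun m _ hm _ => hm)
      rw [← hs] at hB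
      rw [hkk] at hB ⊢
      rw [show ((arr.length : Int)) = ((s.length : Int)) from by rw [hlen]]
      rw [hA, hB]
      ring
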